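-- pv_equiv track=rewrite | github.com/VanshGosavi07/trial | agents/query_agent.py | _is_rich_dashboard
-- ===== SOURCE A (Python) =====
-- def _is_rich_dashboard(components: list[dict]) -> bool:
--     if not components or len(components) < 7:
--         return False
--
--     kpi_types = {"kpi", "numeric", "gauge", "dial", "bullet"}
--     kpi_count = sum(1 for c in components if c.get("output_type") in kpi_types)
--     has_table = any(c.get("output_type") in {"table", "pivot", "report"} for c in components)
--     unique_types = {c.get("output_type") for c in components if c.get("output_type")}
--
--     return kpi_count >= 3 and has_table and len(unique_types) >= 4
-- ===== SOURCE B (Python) =====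
-- def _is_rich_dashboard(components: list[dict]) -> bool:
--     if len(components) < 7:
--         return False
--     # frequency table of output_type built in one pass; everything else is
--     # derived from the table, not from the component list
--     freq = {}
--     for c in components:
--         t = c.get("output_type")
--         freq[t] = freq.get(t, 0) + 1
--     kpi_count = sum(freq.get(t, 0) for t in ("kpi", "numeric", "gauge", "dial", "bullet"))
--     has_table = any(t in freq for t in ("table", "pivot", "report"))
--     unique_types = sum(1 for t in freq if t)
--     return kpi_count >= 3 and has_table and unique_types >= 4
-- ===== Notes on version B (the rewrite author's own statement) =====
-- stated objective: alternative
-- what changed: B builds a frequency table of output_type in one pass and then derives kpi_count (sum of the five KPI keys' counts), has_table (key membership) and unique_types (number of truthy keys) from the table's distinct keys, instead of A's three scans over the component list.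
import Mathlib
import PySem

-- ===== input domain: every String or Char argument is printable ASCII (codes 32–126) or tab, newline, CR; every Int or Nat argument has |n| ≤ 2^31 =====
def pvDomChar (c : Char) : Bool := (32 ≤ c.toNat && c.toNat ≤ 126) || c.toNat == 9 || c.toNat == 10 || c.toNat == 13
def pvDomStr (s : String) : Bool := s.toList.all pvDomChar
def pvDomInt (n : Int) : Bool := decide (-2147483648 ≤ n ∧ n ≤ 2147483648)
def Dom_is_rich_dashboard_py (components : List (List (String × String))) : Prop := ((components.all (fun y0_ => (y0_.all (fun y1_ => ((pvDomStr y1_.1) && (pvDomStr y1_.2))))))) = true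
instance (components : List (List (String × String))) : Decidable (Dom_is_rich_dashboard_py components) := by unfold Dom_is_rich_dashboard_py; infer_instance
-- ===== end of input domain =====

-- B builds a frequency table of output_type once and derives all three criteria from the
-- table's distinct keys, instead of A's three scans over the component list; same cost.

-- ===== PORT A =====
-- Python's `opt in {set of strings}` : None is in no string set
def pvOptIn (o : Option String) (l : List String) : Bool :=
  match o with
  | some s => l.contains s
  | none => false

def is_rich_dashboard_py (components : List (List (String × String))) : Bool :=
  if components.isEmpty || components.length < 7 then false
  else
    let kpiTypes : List String := ["kpi", "numeric", "gauge", "dial", "bullet"]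
    let kpi_count : Int := components.foldl
      (fun acc c => if pvOptIn ((PySem.Dict.mk c).get? "output_type") kpiTypes then acc + 1 else acc) 0
    let has_table : Bool := components.any
      (fun c => pvOptIn ((PySem.Dict.mk c).get? "output_type") ["table", "pivot", "report"])
    let unique_types : PySem.Set String := components.foldl
      (fun s c => match (PySem.Dict.mk c).get? "output_type" with
        | some t => if t ≠ "" then PySem.Set.add s t else s
        | none => s) PySem.Set.empty
    decide (kpi_count ≥ 3) && has_table && decide ((PySem.Set.len unique_types : Int) ≥ 4)

-- ===== PORT B =====
-- Python truthiness of an Optional[str]: not None and not ""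
def pvTruthy (t : Option String) : Bool :=
  match t with
  | some u => u ≠ ""
  | none => false

def is_rich_dashboard_py_alt (components : List (List (String × String))) : Bool :=
  if components.length < 7 then false
  else
    -- freq[t] = freq.get(t, 0) + 1, one pass
    let freq : PySem.Dict (Option String) Int := components.foldl
      (fun d c =>
        let t := (PySem.Dict.mk c).get? "output_type"
        d.insert t (d.getD t 0 + 1)) PySem.Dict.empty
    let kpi_count : Int :=
      (["kpi", "numeric", "gauge", "dial", "bullet"].map (fun t => freq.getD (some t) 0)).sum
    let has_table : Bool := ["table", "pivot", "report"].any (fun t => freq.contains (some t))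
    let unique_types : Int := ((freq.keys.filter pvTruthy).length : Int)
    decide (kpi_count ≥ 3) && has_table && decide (unique_types ≥ 4)

-- ===== PRECONDITION & SPEC =====
def Spec_is_rich_dashboard_py (components : List (List (String × String))) (out : Bool) : Prop := out = is_rich_dashboard_py_alt components
instance (components : List (List (String × String))) (out : Bool) : Decidable (Spec_is_rich_dashboard_py components out) := by unfold Spec_is_rich_dashboard_py; infer_instance

-- ===== CLAIM (what is proved, stated in full; the proofs are below) =====
def Claim_equal_is_rich_dashboard_py : Prop := ∀ (components : List (List (String × String))), Dom_is_rich_dashboard_py components → Spec_is_rich_dashboard_py components (is_rich_dashboard_py components)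

-- ===== LEMMAS AND PROOFS =====

-- membership characterisation of the table literal set
theorem pvOptIn_table_iff (t : Option String) :
    pvOptIn t ["table", "pivot", "report"] = true ↔
      t = some "table" ∨ t = some "pivot" ∨ t = some "report" := by
  cases t <;> simp [pvOptIn]

-- A's counting scan equals the sum of the five per-type counts
theorem pv_countP_kpi (ts : List (Option String)) :
    ts.countP (fun t => pvOptIn t ["kpi", "numeric", "gauge", "dial", "bullet"]) =
      ts.count (some "kpi") + ts.count (some "numeric") + ts.count (some "gauge") +
      ts.count (some "dial") + ts.count (some "bullet") := by
  induction ts with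
  | nil => rfl
  | cons t ts ih =>
    simp only [List.countP_cons, List.count_cons]
    rw [ih]
    rcases t with _ | s
    · simp [pvOptIn]
    · by_cases h1 : s = "kpi" <;> by_cases h2 : s = "numeric" <;> by_cases h3 : s = "gauge" <;>
        by_cases h4 : s = "dial" <;> by_cases h5 : s = "bullet" <;>
        simp_all [pvOptIn] <;> omega

-- A's any-scan equals the three key-membership tests
theorem pv_any_table (ts : List (Option String)) :
    ts.any (fun t => pvOptIn t ["table", "pivot", "report"]) =
      (ts.contains (some "table") || ts.contains (some "pivot") || ts.contains (some "report")) := by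
  apply Bool.coe_iff_coe.mp
  simp only [List.any_eq_true, Bool.or_eq_true, List.contains_iff_mem, pvOptIn_table_iff]
  constructor
  · rintro ⟨t, ht, rfl | rfl | rfl⟩ <;> tauto
  · intro h
    rcases h with (h | h) | h <;> exact ⟨_, h, by tauto⟩

-- invariant: the truthy part of the Option-level set is the map-some image of A's String-level set
theorem pv_set_inv (ts : List (Option String)) (s1 : PySem.Set (Option String))
    (s2 : PySem.Set String) (h : s1.filter pvTruthy = s2.map some) :
    (ts.foldl PySem.Set.add s1).filter pvTruthy =
      (ts.foldl (fun s t => match t with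
        | some u => if u ≠ "" then PySem.Set.add s u else s
        | none => s) s2).map some := by
  induction ts generalizing s1 s2 with
  | nil => simpa using h
  | cons t ts ih =>
    simp only [List.foldl_cons]
    apply ih
    cases t with
    | none =>
      rw [PySem.Set.add_eq_ite]
      split
      · exact h
      · simpa [pvTruthy] using h
    | some u =>
      show (PySem.Set.add s1 (some u)).filter pvTruthy =
        (if u ≠ "" then PySem.Set.add s2 u else s2).map some
      by_cases hu : u = ""
      · subst hu
        rw [if_neg (by simp), PySem.Set.add_eq_ite]
        split
        · exact h
        · simpa [pvTruthy] using h
      · have hmem : some u ∈ s1 ↔ u ∈ s2 := by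
          constructor
          · intro hm
            have : some u ∈ s1.filter pvTruthy := by
              simp [List.mem_filter, hm, pvTruthy, hu]
            rw [h] at this
            simpa using this
          · intro hm
            have : some u ∈ s2.map some := List.mem_map_of_mem hm
            rw [← h] at this
            exact (List.mem_filter.mp this).1
        rw [if_pos hu]
        by_cases hin : some u ∈ s1
        · rw [PySem.Set.add_of_mem hin, PySem.Set.add_of_mem (hmem.mp hin)]
          exact h
        · rw [PySem.Set.add_of_not_mem hin,
            PySem.Set.add_of_not_mem (fun hm => hin (hmem.mpr hm))]
          simp [List.filter_append, pvTruthy, hu, h]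

-- ===== VERDICT (by name: the statement is the Claim_ definition above) =====
theorem is_rich_dashboard_py_spec : Claim_equal_is_rich_dashboard_py := by
  intro components _
  unfold Spec_is_rich_dashboard_py is_rich_dashboard_py is_rich_dashboard_py_alt
  by_cases hlen : components.length < 7
  · simp [hlen]
  · have hne : ¬ components.isEmpty := by
      cases components with
      | nil => simp at hlen
      | cons a l => simp
    simp only [hlen, hne, Bool.false_or, if_false]
    -- the list of looked-up output types
    have hfreq : components.foldl
        (fun d c =>
          let t := (PySem.Dict.mk c).get? "output_type"
          d.insert t (d.getD t 0 + 1))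
        (PySem.Dict.empty : PySem.Dict (Option String) Int) =
        PySem.Dict.counter (components.map (fun c => (PySem.Dict.mk c).get? "output_type")) := by
      rw [← PySem.Dict.foldl_insert_getD_add_one_eq_counter, List.foldl_map]
    have hkpi : components.foldl
        (fun acc c => if pvOptIn ((PySem.Dict.mk c).get? "output_type")
            ["kpi", "numeric", "gauge", "dial", "bullet"] then acc + 1 else acc) (0 : Int) =
        ((components.map (fun c => (PySem.Dict.mk c).get? "output_type")).countP
          (fun t => pvOptIn t ["kpi", "numeric", "gauge", "dial", "bullet"]) : Int) := by
      rw [PySem.List.foldl_count_if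
        (fun c => pvOptIn ((PySem.Dict.mk c).get? "output_type")
          ["kpi", "numeric", "gauge", "dial", "bullet"]) components 0,
        List.countP_map]
      simp only [zero_add]
      rfl
    have htab : components.any
        (fun c => pvOptIn ((PySem.Dict.mk c).get? "output_type") ["table", "pivot", "report"]) =
        (components.map (fun c => (PySem.Dict.mk c).get? "output_type")).any
          (fun t => pvOptIn t ["table", "pivot", "report"]) := by
      rw [List.any_map]; rfl
    have hset : components.foldl
        (fun s c => match (PySem.Dict.mk c).get? "output_type" with
          | some t => if t ≠ "" then PySem.Set.add s t else s
          | none => s) (PySem.Set.empty : PySem.Set String) =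
        ((components.map (fun c => (PySem.Dict.mk c).get? "output_type")).foldl
          (fun s t => match t with
            | some u => if u ≠ "" then PySem.Set.add s u else s
            | none => s) PySem.Set.empty) := by
      rw [List.foldl_map]
    have hlen_eq : PySem.Set.len
        ((components.map (fun c => (PySem.Dict.mk c).get? "output_type")).foldl
          (fun s t => match t with
            | some u => if u ≠ "" then PySem.Set.add s u else s
            | none => s) PySem.Set.empty) =
        (((PySem.Dict.counter
            (components.map (fun c => (PySem.Dict.mk c).get? "output_type"))).keys.filter
              pvTruthy).length : Int) := by
      rw [PySem.Dict.keys_counter, PySem.Set.ofList_eq_foldl,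
        pv_set_inv _ [] [] rfl]
      simp [PySem.Set.len, PySem.Set.empty]
    simp only [hfreq, hkpi, htab, hset, hlen_eq, pv_any_table, pv_countP_kpi,
      PySem.Dict.getD_counter, PySem.Dict.contains_counter, List.map_cons,
      List.map_nil, List.sum_cons, List.sum_nil, add_zero]
    simp [List.any_cons, List.any_nil, Bool.and_assoc, Bool.or_assoc]
    have hsum : ∀ a b c d e : ℤ, a + b + c + d + e = a + (b + (c + (d + e))) := by
      intros; ring
    rw [hsum]
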